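-- pv_equiv track=rewrite | github.com/esh22nika/llm_security_tool | sentinel/detector_supplychain.py | _detect_typosquatting
-- ===== SOURCE A (Python) =====
-- from typing import Optional
--
-- _KNOWN_MODEL_NAMES = [
--     "bert-base-uncased",
--     "gpt2",
--     "gpt-j-6b",
--     "llama-2-7b",
--     "llama-3-8b",
--     "mistral-7b-v0.1",
--     "falcon-7b",
--     "mpt-7b",
--     "roberta-base",
--     "distilbert-base-uncased",
--     "all-minilm-l6-v2",
--     "sentence-transformers/all-minilm-l6-v2",
-- ]
--
-- def _levenshtein(a: str, b: str) -> int: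
--     """Compute Levenshtein edit distance between two strings."""
--     if a == b:
--         return 0
--     if not a:
--         return len(b)
--     if not b:
--         return len(a)
--     prev = list(range(len(b) + 1))
--     for i, ca in enumerate(a, 1):
--         curr = [i]
--         for j, cb in enumerate(b, 1):
--             curr.append(min(prev[j] + 1, curr[j - 1] + 1, prev[j - 1] + (ca != cb)))
--         prev = curr
--     return prev[-1]
--
-- def _detect_typosquatting(repo_id: str) -> Optional[str]:
--     """
--     Return the squatted model name if the repo_id is suspiciously close to a
--     known legitimate model name, else None.
--     """
--     # Normalise: strip org prefix for name comparison
--     name_part = repo_id.split("/")[-1].lower()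
--
--     for known in _KNOWN_MODEL_NAMES:
--         known_name = known.split("/")[-1].lower()
--         dist = _levenshtein(name_part, known_name)
--         # Short edit distance but not identical → typosquatting candidate
--         if 0 < dist <= max(2, len(known_name) // 8):
--             return known
--     return None
-- ===== SOURCE B (Python) =====
-- from typing import Optional
--
-- _KNOWN_MODEL_NAMES = [
--     "bert-base-uncased",
--     "gpt2",
--     "gpt-j-6b",
--     "llama-2-7b",
--     "llama-3-8b",
--     "mistral-7b-v0.1",
--     "falcon-7b",
--     "mpt-7b",
--     "roberta-base",
--     "distilbert-base-uncased",
--     "all-minilm-l6-v2",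
--     "sentence-transformers/all-minilm-l6-v2",
-- ]
--
-- def _edit_distance(a: str, b: str) -> int:
--     """Levenshtein distance by top-down memoized recursion on prefix lengths."""
--     memo = {}
--     def f(i: int, j: int) -> int:
--         if i == 0:
--             return j
--         if j == 0:
--             return i
--         key = (i, j)
--         if key in memo:
--             return memo[key]
--         cost = 0 if a[i - 1] == b[j - 1] else 1
--         d = min(f(i - 1, j) + 1, f(i, j - 1) + 1, f(i - 1, j - 1) + cost)
--         memo[key] = d
--         return d
--     return f(len(a), len(b))
--
-- def _detect_typosquatting(repo_id: str) -> Optional[str]: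
--     name_part = repo_id.split("/")[-1].lower()
--
--     def suspicious(known: str) -> bool:
--         known_name = known.split("/")[-1].lower()
--         limit = max(2, len(known_name) // 8)
--         # length difference lower-bounds the edit distance: cheap reject
--         if abs(len(name_part) - len(known_name)) > limit:
--             return False
--         d = _edit_distance(name_part, known_name)
--         return 0 < d <= limit
--
--     return next((known for known in _KNOWN_MODEL_NAMES if suspicious(known)), None)
-- ===== Notes on version B (the rewrite author's own statement) =====
-- stated objective: faster
-- what changed: The iterative rolling-row Levenshtein is replaced by a top-down memoized recursion on prefix lengths, a length-difference pre-filter skips candidates whose length already exceeds the threshold, and the first-match loop becomes a next()/find? scan.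
import Mathlib
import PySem

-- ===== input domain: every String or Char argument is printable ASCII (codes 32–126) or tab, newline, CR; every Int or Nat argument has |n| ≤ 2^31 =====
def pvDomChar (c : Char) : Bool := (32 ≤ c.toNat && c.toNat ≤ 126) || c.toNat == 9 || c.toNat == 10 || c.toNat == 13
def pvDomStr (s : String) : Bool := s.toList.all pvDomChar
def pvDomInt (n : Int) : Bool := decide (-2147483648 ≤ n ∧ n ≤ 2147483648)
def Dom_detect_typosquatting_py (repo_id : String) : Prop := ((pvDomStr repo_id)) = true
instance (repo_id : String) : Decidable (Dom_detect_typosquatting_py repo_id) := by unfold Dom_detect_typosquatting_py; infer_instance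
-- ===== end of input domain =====

-- B replaces A's rolling-array Levenshtein by a top-down memoized recursion plus a
-- length-difference pre-filter, and the first-match loop by a find?/next scan (alternative
-- decomposition; the pre-filter also makes B much faster on long repo ids).

-- ===== PORT A =====
def pvKnownModels : List String :=
  ["bert-base-uncased", "gpt2", "gpt-j-6b", "llama-2-7b", "llama-3-8b",
   "mistral-7b-v0.1", "falcon-7b", "mpt-7b", "roberta-base",
   "distilbert-base-uncased", "all-minilm-l6-v2",
   "sentence-transformers/all-minilm-l6-v2"]

-- repo_id.split("/")[-1].lower()  (split("/") is always a non-empty list, so the defaults never fire)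
def pvLastLower (s : String) : String :=
  PySem.Str.lower ((PySem.List.pyGet? ((PySem.Str.split? s "/").getD []) (-1)).getD "")

-- literal port of _levenshtein (rolling rows; all indices are in range, so pyGetD's default is never used)
def pvLevA (a b : List Char) : Int :=
  if a = b then 0
  else if a = [] then (b.length : Int)
  else if b = [] then (a.length : Int)
  else
    let prev := (PySem.List.enumerate a 1).foldl (fun prev p =>
        (PySem.List.enumerate b 1).foldl (fun curr q =>
            curr ++ [min (PySem.List.pyGetD prev q.1 0 + 1)
                     (min (PySem.List.pyGetD curr (q.1 - 1) 0 + 1)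
                          (PySem.List.pyGetD prev (q.1 - 1) 0 + (if p.2 ≠ q.2 then (1 : Int) else 0)))])
          [p.1])
      ((List.range (b.length + 1)).map (fun n => ((n : Nat) : Int)))
    PySem.List.pyGetD prev (-1) 0

def pvDetectLoop (name_part : String) : List String → Option String
  | [] => none
  | known :: rest =>
    let known_name := pvLastLower known
    let dist := pvLevA name_part.toList known_name.toList
    if 0 < dist ∧ dist ≤ max 2 (PySem.Int.floordiv (PySem.Str.len known_name) 8) then some known
    else pvDetectLoop name_part rest

def detect_typosquatting_py (repo_id : String) : Option String :=
  pvDetectLoop (pvLastLower repo_id) pvKnownModels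

-- ===== PORT B =====
-- memoized recursion on prefix lengths (the memo dict threaded through, as Source B's closure cache)
def pvLevGo (a b : List Char) : Nat → Nat → PySem.Dict (Nat × Nat) Int → Int × PySem.Dict (Nat × Nat) Int
  | 0, j, memo => ((j : Int), memo)
  | i+1, 0, memo => (((i+1 : Nat) : Int), memo)
  | i+1, j+1, memo =>
    match memo.get? (i+1, j+1) with
    | some v => (v, memo)
    | none =>
      let cost : Int := if a.getD i ' ' = b.getD j ' ' then 0 else 1
      let r1 := pvLevGo a b i (j+1) memo
      let r2 := pvLevGo a b (i+1) j r1.2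
      let r3 := pvLevGo a b i j r2.2
      let d := min (r1.1 + 1) (min (r2.1 + 1) (r3.1 + cost))
      (d, r3.2.insert (i+1, j+1) d)
  termination_by i j _ => (i, j)

def pvLevB (a b : List Char) : Int :=
  (pvLevGo a b a.length b.length PySem.Dict.empty).1

def pvSuspicious (name_part : String) (known : String) : Bool :=
  let known_name := pvLastLower known
  let limit := max 2 (PySem.Int.floordiv (PySem.Str.len known_name) 8)
  if |PySem.Str.len name_part - PySem.Str.len known_name| > limit then false
  else decide (0 < pvLevB name_part.toList known_name.toList ∧
               pvLevB name_part.toList known_name.toList ≤ limit)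

def detect_typosquatting_py_alt (repo_id : String) : Option String :=
  pvKnownModels.find? (pvSuspicious (pvLastLower repo_id))

-- ===== PRECONDITION & SPEC =====
def Spec_detect_typosquatting_py (repo_id : String) (out : Option String) : Prop := out = detect_typosquatting_py_alt repo_id
instance (repo_id : String) (out : Option String) : Decidable (Spec_detect_typosquatting_py repo_id out) := by unfold Spec_detect_typosquatting_py; infer_instance

-- ===== CLAIM (what is proved, stated in full; the proofs are below) =====
def Claim_equal_detect_typosquatting_py : Prop := ∀ (repo_id : String), Dom_detect_typosquatting_py repo_id → Spec_detect_typosquatting_py repo_id (detect_typosquatting_py repo_id)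

-- ===== LEMMAS AND PROOFS =====

-- the mathematical DP table both programs compute
def pvLevIdx (a b : List Char) : Nat → Nat → Int
  | 0, j => (j : Int)
  | i+1, 0 => ((i+1 : Nat) : Int)
  | i+1, j+1 =>
    min (pvLevIdx a b i (j+1) + 1)
      (min (pvLevIdx a b (i+1) j + 1)
        (pvLevIdx a b i j + (if a.getD i ' ' = b.getD j ' ' then 0 else 1)))
  termination_by i j => (i, j)

theorem pvLevIdx_nonneg (a b : List Char) (i j : Nat) : 0 ≤ pvLevIdx a b i j := by
  fun_induction pvLevIdx a b i j with
  | case1 j => omega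
  | case2 i => omega
  | case3 i j ih1 ih2 ih3 => split_ifs <;> omega

theorem pvLevIdx_ge_diff (a b : List Char) (i j : Nat) :
    |(i : Int) - (j : Int)| ≤ pvLevIdx a b i j := by
  fun_induction pvLevIdx a b i j with
  | case1 j => rw [abs_sub_le_iff]; omega
  | case2 i => rw [abs_sub_le_iff]; push_cast; omega
  | case3 i j ih1 ih2 ih3 =>
    rw [abs_sub_le_iff] at *
    push_cast at *
    split_ifs <;> omega

theorem pvLevIdx_self (a b : List Char) (i : Nat)
    (h : ∀ k, k < i → a.getD k ' ' = b.getD k ' ') : pvLevIdx a b i i = 0 := by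
  induction i with
  | zero => rw [pvLevIdx.eq_1]; rfl
  | succ n ih =>
    have h0 := ih (fun k hk => h k (by omega))
    have h1 := pvLevIdx_nonneg a b n (n+1)
    have h2 := pvLevIdx_nonneg a b (n+1) n
    rw [pvLevIdx.eq_3, h0, if_pos (h n (by omega))]
    omega

-- ===== B-side: the memoized recursion computes pvLevIdx =====
def pvMemoInv (a b : List Char) (m : PySem.Dict (Nat × Nat) Int) : Prop :=
  ∀ i j v, m.get? (i, j) = some v → v = pvLevIdx a b i j

theorem pvLevGo_correct (a b : List Char) : ∀ (n i j : Nat), i + j ≤ n →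
    ∀ m, pvMemoInv a b m →
    (pvLevGo a b i j m).1 = pvLevIdx a b i j ∧ pvMemoInv a b (pvLevGo a b i j m).2 := by
  intro n
  induction n with
  | zero =>
    intro i j hij m hm
    have hi : i = 0 := by omega
    have hj : j = 0 := by omega
    subst hi; subst hj
    rw [pvLevGo.eq_1, pvLevIdx.eq_1]
    exact ⟨rfl, hm⟩
  | succ n ih =>
    intro i j hij m hm
    match i, j with
    | 0, j =>
      rw [pvLevGo.eq_1, pvLevIdx.eq_1]
      exact ⟨rfl, hm⟩
    | i+1, 0 =>
      rw [pvLevGo.eq_2, pvLevIdx.eq_2]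
      exact ⟨rfl, hm⟩
    | i+1, j+1 =>
      rw [pvLevGo.eq_3]
      cases hv : m.get? (i+1, j+1) with
      | some v =>
        exact ⟨hm _ _ _ hv, hm⟩
      | none =>
        obtain ⟨e1, inv1⟩ := ih i (j+1) (by omega) m hm
        obtain ⟨e2, inv2⟩ := ih (i+1) j (by omega) _ inv1
        obtain ⟨e3, inv3⟩ := ih i j (by omega) _ inv2
        refine ⟨?_, ?_⟩
        · show min ((pvLevGo a b i (j+1) m).1 + 1) _ = _
          rw [e1, e2, e3, pvLevIdx.eq_3]
        · intro i' j' v' hget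
          dsimp only at hget
          rw [PySem.Dict.get?_insert] at hget
          by_cases hk : (i', j') = (i + 1, j + 1)
          · rw [if_pos hk] at hget
            rw [Prod.mk.injEq] at hk
            obtain ⟨rfl, rfl⟩ := hk
            injection hget with hval
            rw [← hval, e1, e2, e3, pvLevIdx.eq_3]
          · rw [if_neg hk] at hget
            exact inv3 _ _ _ hget

theorem pvLevB_eq (a b : List Char) : pvLevB a b = pvLevIdx a b a.length b.length := by
  have h := pvLevGo_correct a b (a.length + b.length) a.length b.length (le_refl _)
    PySem.Dict.empty
    (by intro i j v hv; rw [PySem.Dict.get?_empty] at hv; cases hv)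
  exact h.1

-- ===== A-side: the rolling rows compute pvLevIdx =====

theorem pvEnumerate_eq (xs : List Char) (s : Int) :
    PySem.List.enumerate xs s
      = (List.range xs.length).map (fun (k : Nat) => (s + (k : Int), xs.getD k ' ')) := by
  induction xs generalizing s with
  | nil => simp [PySem.List.enumerate_nil]
  | cons x xs ih =>
    rw [PySem.List.enumerate_cons, ih]
    simp only [List.length_cons, List.range_succ_eq_map, List.map_cons, List.map_map]
    refine congrArg₂ _ (by simp) ?_
    apply List.map_congr_left
    intro k _
    simp only [Function.comp_apply, List.getD_cons_succ]
    refine congrArg₂ _ ?_ rfl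
    push_cast; ring

theorem pvGetD_map_range (n k : Nat) (f : Nat → Int) (d : Int) (hk : k < n) :
    ((List.range n).map f).getD k d = f k := by
  simp [List.getD, hk]

-- one inner pass: from row i (and a's (i+1)-st character) to row i+1
theorem pvInnerFold (a b : List Char) (i : Nat) :
    ∀ t, t ≤ b.length →
      ((List.range t).map (fun (k : Nat) => ((1 : Int) + (k : Int), b.getD k ' '))).foldl
        (fun curr q =>
            curr ++ [min (PySem.List.pyGetD ((List.range (b.length + 1)).map (fun j => pvLevIdx a b i j)) q.1 0 + 1)
                     (min (PySem.List.pyGetD curr (q.1 - 1) 0 + 1)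
                          (PySem.List.pyGetD ((List.range (b.length + 1)).map (fun j => pvLevIdx a b i j)) (q.1 - 1) 0 +
                            (if a.getD i ' ' ≠ q.2 then (1 : Int) else 0)))])
        [((i : Int) + 1)]
      = (List.range (t + 1)).map (fun j => pvLevIdx a b (i + 1) j) := by
  intro t
  induction t with
  | zero =>
    intro _
    have h2 : pvLevIdx a b (i+1) 0 = (i : Int) + 1 := by rw [pvLevIdx.eq_2]; omega
    simp [List.range_one, h2]
  | succ t ih =>
    intro ht
    have ht' : t ≤ b.length := by omega
    have hsplit : (List.range (t+1)).map (fun (k : Nat) => ((1 : Int) + (k : Int), b.getD k ' '))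
        = (List.range t).map (fun (k : Nat) => ((1 : Int) + (k : Int), b.getD k ' '))
          ++ [((1 : Int) + (t : Int), b.getD t ' ')] := by
      rw [List.range_succ, List.map_append]; rfl
    rw [hsplit, List.foldl_append, ih ht']
    simp only [List.foldl_cons, List.foldl_nil]
    have c1 : (1 : Int) + (t : Int) = ((t + 1 : Nat) : Int) := by omega
    have c2 : (1 : Int) + (t : Int) - 1 = ((t : Nat) : Int) := by omega
    have l1 : PySem.List.pyGetD ((List.range (b.length + 1)).map (fun j => pvLevIdx a b i j)) (1 + (t : Int)) 0
        = pvLevIdx a b i (t + 1) := by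
      rw [c1, PySem.List.pyGetD_natCast, pvGetD_map_range _ _ _ _ (by omega)]
    have l2 : PySem.List.pyGetD ((List.range (t + 1)).map (fun j => pvLevIdx a b (i + 1) j)) (1 + (t : Int) - 1) 0
        = pvLevIdx a b (i + 1) t := by
      rw [c2, PySem.List.pyGetD_natCast, pvGetD_map_range _ _ _ _ (by omega)]
    have l3 : PySem.List.pyGetD ((List.range (b.length + 1)).map (fun j => pvLevIdx a b i j)) (1 + (t : Int) - 1) 0
        = pvLevIdx a b i t := by
      rw [c2, PySem.List.pyGetD_natCast, pvGetD_map_range _ _ _ _ (by omega)]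
    rw [l1, l2, l3]
    have hsplit2 : (List.range (t+1+1)).map (fun j => pvLevIdx a b (i + 1) j)
        = (List.range (t+1)).map (fun j => pvLevIdx a b (i + 1) j) ++ [pvLevIdx a b (i + 1) (t + 1)] := by
      rw [List.range_succ, List.map_append]; rfl
    rw [hsplit2]
    refine congrArg₂ _ rfl ?_
    refine congrArg₂ _ ?_ rfl
    rw [pvLevIdx.eq_3]
    refine congrArg₂ _ rfl (congrArg₂ _ rfl (congrArg₂ _ rfl ?_))
    simp only [ne_eq, ite_not]

-- the outer fold over a's characters
theorem pvOuterFold (a b : List Char) :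
    ∀ s, s ≤ a.length →
      ((List.range s).map (fun (k : Nat) => ((1 : Int) + (k : Int), a.getD k ' '))).foldl
        (fun prev p =>
          (PySem.List.enumerate b 1).foldl (fun curr q =>
              curr ++ [min (PySem.List.pyGetD prev q.1 0 + 1)
                       (min (PySem.List.pyGetD curr (q.1 - 1) 0 + 1)
                            (PySem.List.pyGetD prev (q.1 - 1) 0 + (if p.2 ≠ q.2 then (1 : Int) else 0)))])
            [p.1])
        ((List.range (b.length + 1)).map (fun n => ((n : Nat) : Int)))
      = (List.range (b.length + 1)).map (fun j => pvLevIdx a b s j) := by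
  intro s
  induction s with
  | zero =>
    intro _
    simp only [List.range_zero, List.map_nil, List.foldl_nil]
    apply List.map_congr_left
    intro j _
    exact (pvLevIdx.eq_1 a b j).symm
  | succ s ih =>
    intro hs
    have hs' : s ≤ a.length := by omega
    have hsplit : (List.range (s+1)).map (fun (k : Nat) => ((1 : Int) + (k : Int), a.getD k ' '))
        = (List.range s).map (fun (k : Nat) => ((1 : Int) + (k : Int), a.getD k ' '))
          ++ [((1 : Int) + (s : Int), a.getD s ' ')] := by
      rw [List.range_succ, List.map_append]; rfl
    rw [hsplit, List.foldl_append, ih hs']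
    simp only [List.foldl_cons, List.foldl_nil]
    rw [pvEnumerate_eq]
    have hfix : (1 : Int) + (s : Int) = (s : Int) + 1 := by ring
    rw [hfix]
    exact pvInnerFold a b s b.length (le_refl _)

theorem pvLevA_eq (a b : List Char) : pvLevA a b = pvLevIdx a b a.length b.length := by
  unfold pvLevA
  by_cases hab : a = b
  · rw [if_pos hab]
    subst hab
    exact (pvLevIdx_self a a a.length (fun _ _ => rfl)).symm
  rw [if_neg hab]
  by_cases ha : a = []
  · rw [if_pos ha]
    subst ha
    simp [pvLevIdx.eq_1]
  rw [if_neg ha]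
  by_cases hb : b = []
  · rw [if_pos hb]
    subst hb
    cases hl : a.length with
    | zero => exact absurd (List.length_eq_zero_iff.mp hl) ha
    | succ n => simp only [List.length_nil]; rw [pvLevIdx.eq_2]
  rw [if_neg hb]
  rw [pvEnumerate_eq a 1, pvOuterFold a b a.length (le_refl _)]
  have hne : ((List.range (b.length + 1)).map (fun j => pvLevIdx a b a.length j)) ≠ [] := by
    simp
  rw [PySem.List.pyGetD_neg_one _ _ hne, List.getLast_eq_getElem]
  simp

-- ===== the detection scans agree =====
theorem pvLoop_eq_find (np : String) (l : List String) :
    pvDetectLoop np l = l.find? (pvSuspicious np) := by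
  induction l with
  | nil => rfl
  | cons known rest ih =>
    rw [pvDetectLoop, List.find?_cons]
    have hd : pvLevA np.toList (pvLastLower known).toList
        = pvLevB np.toList (pvLastLower known).toList := by
      rw [pvLevA_eq, pvLevB_eq]
    by_cases hc : 0 < pvLevA np.toList (pvLastLower known).toList ∧
        pvLevA np.toList (pvLastLower known).toList
          ≤ max 2 (PySem.Int.floordiv (PySem.Str.len (pvLastLower known)) 8)
    · rw [if_pos hc]
      have hs : pvSuspicious np known = true := by
        unfold pvSuspicious
        have hlow : ¬ (|PySem.Str.len np - PySem.Str.len (pvLastLower known)| >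
            max 2 (PySem.Int.floordiv (PySem.Str.len (pvLastLower known)) 8)) := by
          have hge := pvLevIdx_ge_diff np.toList (pvLastLower known).toList
            np.toList.length (pvLastLower known).toList.length
          rw [← pvLevA_eq] at hge
          have hc' := hc
          simp only [PySem.Str.len_eq] at hc' ⊢
          omega
        simp only [if_neg hlow, ← hd]
        exact decide_eq_true hc
      rw [hs]
    · rw [if_neg hc, ih]
      have hs : pvSuspicious np known = false := by
        unfold pvSuspicious
        by_cases hlow : |PySem.Str.len np - PySem.Str.len (pvLastLower known)| >
            max 2 (PySem.Int.floordiv (PySem.Str.len (pvLastLower known)) 8)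
        · simp only [if_pos hlow]
        · simp only [if_neg hlow, ← hd]
          exact decide_eq_false hc
      rw [hs]

-- ===== VERDICT (by name: the statement is the Claim_ definition above) =====
theorem detect_typosquatting_py_spec : Claim_equal_detect_typosquatting_py := by
  intro repo_id _
  unfold Spec_detect_typosquatting_py detect_typosquatting_py detect_typosquatting_py_alt
  exact pvLoop_eq_find (pvLastLower repo_id) pvKnownModels
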